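-- pv_equiv track=rewrite | github.com/pypi-data/pypi-mirror-333 | packages/selfpowerdecomposer/selfpowerdecomposer-0.1.2-py3-none-any.whl/selfpowerdecomposer/selfpowerdecomposer/core.py | should_apply_rle
-- ===== SOURCE A (Python) =====
-- def should_apply_rle(delta_data):
--     """
--     Determine if RLE should be applied based on data characteristics.
--
--     Args:
--         delta_data (list): Delta-encoded data
--
--     Returns:
--         bool: True if RLE should be applied
--     """
--     # Count runs of same value
--     runs = 1
--     run_lengths = []
--
--     for i in range(1, len(delta_data)):
--         if delta_data[i] == delta_data[i-1]:
--             runs += 1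
--         else:
--             if runs > 1:
--                 run_lengths.append(runs)
--             runs = 1
--
--     if runs > 1:
--         run_lengths.append(runs)
--
--     # If we have runs of length > 3, RLE is likely beneficial
--     if run_lengths and max(run_lengths) > 3:
--         return True
--
--     # If we have many runs, RLE is likely beneficial
--     if len(run_lengths) > len(delta_data) // 10:
--         return True
--
--     # If we have many zeros, RLE is likely beneficial
--     zero_count = delta_data.count(0)
--     if zero_count > len(delta_data) // 5:
--         return True
--
--     return False
-- ===== SOURCE B (Python) =====
-- def should_apply_rle(delta_data):
--     n = len(delta_data)
--     # Boolean edge sequence: adj[i] says delta_data[i] == delta_data[i+1].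
--     adj = [a == b for a, b in zip(delta_data, delta_data[1:])]
--     # A run of length > 3 exists iff three consecutive edges are all equal.
--     has_long = any(adj[i] and adj[i + 1] and adj[i + 2] for i in range(len(adj) - 2))
--     # Each maximal run of length > 1 starts at exactly one rising edge of adj.
--     multi = 0
--     prev = False
--     for e in adj:
--         if e and not prev:
--             multi += 1
--         prev = e
--     return has_long or multi > n // 10 or delta_data.count(0) > n // 5
-- ===== Notes on version B (the rewrite author's own statement) =====
-- stated objective: alternative
-- what changed: A maintains a run counter and a run-length table and thresholds over that table; B never computes run lengths: it builds the boolean adjacency-edge sequence adj[i]=(x[i]==x[i+1]) and reads the heuristics off it directly - a run longer than 3 is a sliding window of 3 true edges, and the number of multi-element runs is the number of rising edges of adj.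
import Mathlib
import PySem

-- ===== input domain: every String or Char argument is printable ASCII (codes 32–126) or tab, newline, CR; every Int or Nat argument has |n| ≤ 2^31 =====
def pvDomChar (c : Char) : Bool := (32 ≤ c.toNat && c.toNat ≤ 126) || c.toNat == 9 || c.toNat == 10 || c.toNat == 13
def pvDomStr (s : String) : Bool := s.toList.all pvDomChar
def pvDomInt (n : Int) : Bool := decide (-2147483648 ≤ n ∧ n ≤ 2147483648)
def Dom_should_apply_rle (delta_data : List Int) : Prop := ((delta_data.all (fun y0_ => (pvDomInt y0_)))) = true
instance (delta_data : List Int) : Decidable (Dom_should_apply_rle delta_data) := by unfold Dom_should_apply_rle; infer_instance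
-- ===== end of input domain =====

-- B replaces A's run counter + run-length table by the boolean adjacency-edge sequence
-- adj[i] = (x[i] == x[i+1]) and reads the heuristics off it directly (objective: alternative).

-- ===== PORT A =====
-- A's "for i in range(1, len(delta_data))" comparing delta_data[i] with delta_data[i-1]:
-- structural recursion over the same values, carrying the previous element, the current
-- run counter `runs` and the accumulated `run_lengths` (the same state).
def sarLoopA (prev : Int) (rest : List Int) (runs : Int) (runLengths : List Int) : Int × List Int :=
  match rest with
  | [] => (runs, runLengths)
  | y :: ys =>
    if y == prev then sarLoopA y ys (runs + 1) runLengths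
    else sarLoopA y ys 1 (if runs > 1 then runLengths ++ [runs] else runLengths)

def should_apply_rle (delta_data : List Int) : Bool :=
  let st : Int × List Int :=
    match delta_data with
    | [] => (1, [])                      -- empty: the loop body never runs
    | x :: rest => sarLoopA x rest 1 []
  -- "if runs > 1: run_lengths.append(runs)" after the loop
  let run_lengths : List Int := if st.1 > 1 then st.2 ++ [st.1] else st.2
  if (!run_lengths.isEmpty) && (PySem.List.max? run_lengths (fun r => r)).getD 0 > 3 then true
  else if (run_lengths.length : Int) > PySem.Int.floordiv (delta_data.length : Int) 10 then true
  else if (PySem.List.count delta_data 0 : Int) > PySem.Int.floordiv (delta_data.length : Int) 5 then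
    true
  else false

-- ===== PORT B =====
-- "[a == b for a, b in zip(delta_data, delta_data[1:])]"
def adjOf : List Int → List Bool
  | x :: y :: rest => (x == y) :: adjOf (y :: rest)
  | _ => []

-- "any(adj[i] and adj[i+1] and adj[i+2] for i in range(len(adj) - 2))": windows of 3 edges
def hasLongB : List Bool → Bool
  | [] => false
  | a :: rest =>
    (match rest with
     | b :: c :: _ => a && b && c
     | _ => false) || hasLongB rest

-- "for e in adj: if e and not prev: multi += 1; prev = e"
def edgesLoop : List Bool → Bool → Int → Int
  | [], _, multi => multi
  | e :: rest, prev, multi => edgesLoop rest e (if e && !prev then multi + 1 else multi)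

def should_apply_rle_alt (delta_data : List Int) : Bool :=
  let n : Int := (delta_data.length : Int)
  let adj := adjOf delta_data
  let has_long := hasLongB adj
  let multi := edgesLoop adj false 0
  has_long || decide (multi > PySem.Int.floordiv n 10)
    || decide ((PySem.List.count delta_data 0 : Int) > PySem.Int.floordiv n 5)

-- ===== PRECONDITION & SPEC =====
def Spec_should_apply_rle (delta_data : List Int) (out : Bool) : Prop := out = should_apply_rle_alt delta_data
instance (delta_data : List Int) (out : Bool) : Decidable (Spec_should_apply_rle delta_data out) := by unfold Spec_should_apply_rle; infer_instance

-- ===== CLAIM (what is proved, stated in full; the proofs are below) =====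
def Claim_equal_should_apply_rle : Prop := ∀ (delta_data : List Int), Dom_should_apply_rle delta_data → Spec_should_apply_rle delta_data (should_apply_rle delta_data)

-- ===== LEMMAS AND PROOFS =====

-- canonical description used only by the proofs: the table of maximal run lengths
def sarScan (x : Int) (l : List Int) : Nat × List Int :=
  match l with
  | [] => (0, [])
  | y :: ys => if y == x then ((sarScan x ys).1 + 1, (sarScan x ys).2) else (0, y :: ys)

theorem sarScan_len (x : Int) (l : List Int) : (sarScan x l).2.length ≤ l.length := by
  induction l with
  | nil => simp [sarScan]
  | cons y ys ih =>
    by_cases h : y = x <;> simp [sarScan, h] <;> omega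

def sarTable (l : List Int) : List Int :=
  match l with
  | [] => []
  | x :: rest => ((sarScan x rest).1 + 1 : Int) :: sarTable (sarScan x rest).2
termination_by l.length
decreasing_by
  exact Nat.lt_succ_of_le (sarScan_len x rest)

def sarFinish (st : Int × List Int) : List Int := if st.1 > 1 then st.2 ++ [st.1] else st.2

-- A's flushed loop result = accumulator ++ the (>1)-filtered run-length table
theorem sarLoopA_eq_table (rest : List Int) : ∀ (prev runs : Int) (acc : List Int),
    sarFinish (sarLoopA prev rest runs acc)
      = acc ++ (((runs + ((sarScan prev rest).1 : Int)) :: sarTable (sarScan prev rest).2).filter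
          (fun r => r > 1)) := by
  induction rest with
  | nil =>
    intro prev runs acc
    simp only [sarLoopA, sarScan, sarFinish, sarTable]
    by_cases h : runs > 1 <;> simp [h, List.filter]
  | cons y ys ih =>
    intro prev runs acc
    by_cases h : y = prev
    · subst h
      simp only [sarLoopA, sarScan, beq_self_eq_true, if_true]
      rw [ih]
      norm_num
      ring_nf
    · have hb : (y == prev) = false := by simp [h]
      simp only [sarLoopA, sarScan, hb, Bool.false_eq_true, if_false]
      rw [ih]
      simp only [sarTable, List.filter]
      by_cases hr : runs > 1
      · simp [hr]
        ring_nf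
      · simp [hr]
        ring_nf

theorem runLengths_eq (x : Int) (rest : List Int) :
    sarFinish (sarLoopA x rest 1 []) = (sarTable (x :: rest)).filter (fun r => r > 1) := by
  rw [sarLoopA_eq_table]
  simp [sarTable]
  ring_nf

-- the "nonempty and max > 3" test is "some element > 3"
theorem any3_foldl (t : List Int) : ∀ (x : Int),
    (x :: t).any (fun r => decide (3 < r)) = decide (3 < t.foldl max x) := by
  induction t with
  | nil => intro x; simp
  | cons y ys ih =>
    intro x
    have h := ih (max x y)
    simp only [List.any_cons] at h ⊢
    rw [List.foldl_cons, ← h, ← Bool.or_assoc]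
    congr 1
    rcases le_total x y with hxy | hxy
    · rw [max_eq_right hxy]
      by_cases h2 : 3 < y
      · simp [h2]
      · have hx : ¬ 3 < x := fun hc => h2 (lt_of_lt_of_le hc hxy)
        simp [h2, hx]
    · rw [max_eq_left hxy]
      by_cases h2 : 3 < x
      · simp [h2]
      · have hy : ¬ 3 < y := fun hc => h2 (lt_of_lt_of_le hc hxy)
        simp [h2, hy]

theorem maxTest_eq_any (l : List Int) :
    ((!l.isEmpty) && decide ((PySem.List.max? l (fun r => r)).getD 0 > 3))
      = l.any (fun r => decide (3 < r)) := by
  cases l with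
  | nil => simp
  | cons x t =>
    rw [PySem.List.max?_id_cons, any3_foldl]
    simp

-- adjacency decomposition: the leading run gives a block of `true` edges
def adjTail (r : List Int) : List Bool :=
  match r with
  | [] => []
  | _ :: _ => false :: adjOf r

theorem adjOf_decomp (x : Int) (rest : List Int) :
    adjOf (x :: rest) = List.replicate (sarScan x rest).1 true ++ adjTail (sarScan x rest).2 := by
  induction rest generalizing x with
  | nil => simp [adjOf, sarScan, adjTail]
  | cons y ys ih =>
    by_cases h : y = x
    · subst h
      simp [adjOf, sarScan, List.replicate_succ, ih y]
    · have hb : (y == x) = false := by simp [h]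
      simp [adjOf, sarScan, hb, adjTail, Ne.symm h]

theorem hasLongB_false_cons (u : List Bool) : hasLongB (false :: u) = hasLongB u := by
  cases u with
  | nil => simp [hasLongB]
  | cons a v => cases v <;> simp [hasLongB]

theorem hasLongB_block (k : Nat) (v : List Bool)
    (hv : v = [] ∨ ∃ u, v = false :: u) :
    hasLongB (List.replicate k true ++ v) = (decide (3 ≤ k) || hasLongB v) := by
  match k with
  | 0 => simp
  | 1 =>
    rcases hv with rfl | ⟨u, rfl⟩
    · simp [hasLongB]
    · cases u with
      | nil => simp [hasLongB]
      | cons a w => cases w <;> simp [hasLongB]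
  | 2 =>
    rcases hv with rfl | ⟨u, rfl⟩
    · simp [hasLongB, List.replicate]
    · cases u with
      | nil => simp [hasLongB, List.replicate]
      | cons a w => cases w <;> simp [hasLongB, List.replicate]
  | (k + 3) =>
    have h3 : List.replicate (k + 3) true ++ v
        = true :: true :: true :: (List.replicate k true ++ v) := by
      simp [List.replicate_succ]
    have ht : hasLongB (true :: true :: true :: (List.replicate k true ++ v)) = true := by
      simp [hasLongB]
    have hd : (3 : Nat) ≤ k + 3 := by omega
    rw [h3, ht]
    simp [hd]

theorem hasLongB_eq_table (l : List Int) :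
    hasLongB (adjOf l) = (sarTable l).any (fun r => decide (3 < r)) := by
  induction l using sarTable.induct with
  | case1 => simp [adjOf, hasLongB, sarTable]
  | case2 x rest ih =>
    have hv : adjTail (sarScan x rest).2 = []
        ∨ ∃ u, adjTail (sarScan x rest).2 = false :: u := by
      cases (sarScan x rest).2 <;> simp [adjTail]
    have h2 : hasLongB (adjTail (sarScan x rest).2) = hasLongB (adjOf (sarScan x rest).2) := by
      cases (sarScan x rest).2 <;> simp [adjTail, adjOf, hasLongB_false_cons]
    rw [adjOf_decomp, hasLongB_block _ _ hv, h2, ih]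
    simp only [sarTable, List.any_cons]
    congr 1
    simp only [decide_eq_decide]
    omega

theorem edgesLoop_rep (k : Nat) : ∀ (u : List Bool) (prev : Bool) (m : Int),
    edgesLoop (List.replicate k true ++ u) prev m
      = edgesLoop u (if k = 0 then prev else true)
          (if k ≠ 0 && !prev then m + 1 else m) := by
  induction k with
  | zero => intro u prev m; simp [edgesLoop]
  | succ k ih =>
    intro u prev m
    rw [List.replicate_succ, List.cons_append]
    simp only [edgesLoop, ih]
    cases prev <;> cases k <;> simp

theorem edgesLoop_eq_table (l : List Int) : ∀ (m : Int),
    edgesLoop (adjOf l) false m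
      = m + (((sarTable l).filter (fun r => r > 1)).length : Int) := by
  induction l using sarTable.induct with
  | case1 => simp [adjOf, sarTable, edgesLoop]
  | case2 x rest ih =>
    intro m
    rw [adjOf_decomp, edgesLoop_rep]
    have hstep : ∀ (p : Bool) (m' : Int),
        edgesLoop (adjTail (sarScan x rest).2) p m'
          = m' + (((sarTable (sarScan x rest).2).filter (fun r => r > 1)).length : Int) := by
      intro p m'
      cases hr : (sarScan x rest).2 with
      | nil => simp [adjTail, edgesLoop, sarTable]
      | cons z zs =>
        have h1 : edgesLoop (adjTail (z :: zs)) p m' = edgesLoop (adjOf (z :: zs)) false m' := by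
          simp [adjTail, edgesLoop]
        rw [h1, ← hr]
        exact ih m'
    rw [hstep]
    simp only [sarTable, List.filter_cons]
    cases hk : (sarScan x rest).1 with
    | zero =>
      have h0 : ¬ ((0 : Int) + 1 > 1) := by omega
      simp [h0]
    | succ k =>
      have h1 : (((k : Int) + 1) + 1 > 1) := by omega
      have h2 : (k : Nat) + 1 ≠ 0 := by omega
      simp [h1, h2]
      push_cast
      ring

-- ===== VERDICT (by name: the statement is the Claim_ definition above) =====
theorem should_apply_rle_spec : Claim_equal_should_apply_rle := by
  intro delta_data _
  unfold Spec_should_apply_rle should_apply_rle should_apply_rle_alt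
  cases delta_data with
  | nil =>
    simp [adjOf, hasLongB, edgesLoop, PySem.Int.floordiv, PySem.List.count]
  | cons x rest =>
    have h := runLengths_eq x rest
    simp only [sarFinish] at h
    simp only [h]
    rw [show (((sarTable (x :: rest)).filter (fun r => r > 1)).isEmpty.not
         && decide ((PySem.List.max? ((sarTable (x :: rest)).filter (fun r => r > 1)) (fun r => r)).getD 0 > 3))
        = hasLongB (adjOf (x :: rest)) from ?_]
    · rw [edgesLoop_eq_table]
      cases hb1 : hasLongB (adjOf (x :: rest)) <;> simp_all
    · rw [maxTest_eq_any, hasLongB_eq_table, List.any_filter]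
      congr 1
      funext r
      by_cases h3 : 3 < r <;> simp [h3] <;> omega
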